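-- pv_equiv track=rewrite | github.com/noellethen/mahjong.io | backend/game_logic/rules.py | all_pong
-- ===== SOURCE A (Python) =====
-- from collections import Counter
--
-- def all_pong(hand):
--     tile_counts = Counter(hand)
--     triplet_count = 0
--     pair_count = 0
--
--     for tile, count in tile_counts.items():
--         if count == 2:
--             pair_count += 1
--         elif count == 3:
--             triplet_count += 1
--         elif count == 4:
--             triplet_count += 1
--             pair_count += 1
--         else:
--             return False
--
--     return triplet_count == 4 and pair_count == 1
-- ===== SOURCE B (Python) =====
-- from collections import Counter
--
-- def all_pong(hand):
--     pattern = sorted(Counter(hand).values())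
--     return pattern == [2, 3, 3, 3, 3] or pattern == [3, 3, 3, 4]
-- ===== Notes on version B (the rewrite author's own statement) =====
-- stated objective: alternative
-- what changed: Instead of accumulating triplet/pair counters in a branching loop, B sorts the multiplicity list and compares it as a whole against the only two multiset shapes A accepts ([2,3,3,3,3] and [3,3,3,4], the latter because a count of 4 scores as both a triplet and a pair).
import Mathlib
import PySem

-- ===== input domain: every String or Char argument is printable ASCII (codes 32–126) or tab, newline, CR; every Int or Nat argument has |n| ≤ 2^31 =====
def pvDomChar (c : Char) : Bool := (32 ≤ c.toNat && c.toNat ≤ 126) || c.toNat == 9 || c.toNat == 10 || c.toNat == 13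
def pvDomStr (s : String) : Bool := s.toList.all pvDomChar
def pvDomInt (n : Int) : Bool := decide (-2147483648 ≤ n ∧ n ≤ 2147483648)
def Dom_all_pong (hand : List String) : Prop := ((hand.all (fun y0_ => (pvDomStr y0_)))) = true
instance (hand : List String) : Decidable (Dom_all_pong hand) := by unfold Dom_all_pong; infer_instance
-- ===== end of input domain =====

-- B replaces A's accumulating branch loop by sorting the multiplicity list and comparing it
-- whole against the only two shapes A accepts ([2,3,3,3,3] and [3,3,3,4]); same task, different algorithm.

-- ===== PORT A =====
-- the for-loop over tile_counts.items() with its early 'return False'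
def allPongLoop : List (String × Int) → Int → Int → Bool
  | [], triplet_count, pair_count => triplet_count == 4 && pair_count == 1
  | (_, count) :: rest, triplet_count, pair_count =>
    if count == 2 then allPongLoop rest triplet_count (pair_count + 1)
    else if count == 3 then allPongLoop rest (triplet_count + 1) pair_count
    else if count == 4 then allPongLoop rest (triplet_count + 1) (pair_count + 1)
    else false

def all_pong (hand : List String) : Bool :=
  allPongLoop (PySem.Dict.counter hand).items 0 0

-- ===== PORT B =====
def all_pong_alt (hand : List String) : Bool :=
  let pattern := PySem.List.sorted (PySem.Dict.counter hand).values (fun x => x) false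
  pattern == [2, 3, 3, 3, 3] || pattern == [3, 3, 3, 4]

-- ===== PRECONDITION & SPEC =====
def Spec_all_pong (hand : List String) (out : Bool) : Prop := out = all_pong_alt hand
instance (hand : List String) (out : Bool) : Decidable (Spec_all_pong hand out) := by unfold Spec_all_pong; infer_instance

-- ===== CLAIM (what is proved, stated in full; the proofs are below) =====
def Claim_equal_all_pong : Prop := ∀ (hand : List String), Dom_all_pong hand → Spec_all_pong hand (all_pong hand)

-- ===== LEMMAS AND PROOFS =====

-- characterisation of A's loop: valid multiplicities and the two count totals
lemma allPongLoop_eq (l : List (String × Int)) (t p : Int) :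
    allPongLoop l t p =
      (l.all (fun kc => kc.2 == 2 || kc.2 == 3 || kc.2 == 4)
       && (t + (l.countP (fun kc => kc.2 == 3 || kc.2 == 4) : Int) == 4)
       && (p + (l.countP (fun kc => kc.2 == 2 || kc.2 == 4) : Int) == 1)) := by
  induction l generalizing t p with
  | nil => simp [allPongLoop]
  | cons kc rest ih =>
    obtain ⟨k, c⟩ := kc
    by_cases h2 : c = 2
    · subst h2; simp [allPongLoop, ih, Int.add_assoc, Int.add_comm]
    · by_cases h3 : c = 3
      · subst h3; simp [allPongLoop, ih, Int.add_assoc, Int.add_comm]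
      · by_cases h4 : c = 4
        · subst h4; simp [allPongLoop, ih, Int.add_assoc, Int.add_comm]
        · simp [allPongLoop, h2, h3, h4]

-- counting a two-element disjunction is the sum of the two counts
lemma countP_or_eq_count_add_count (l : List Int) (a b : Int) (hab : a ≠ b) :
    l.countP (fun c => c == a || c == b) = l.count a + l.count b := by
  induction l with
  | nil => simp
  | cons x xs ih =>
    by_cases hx : x = a
    · subst hx; simp [ih, hab]; omega
    · by_cases hx' : x = b
      · subst hx'; simp [ih, hx]; omega
      · simp [ih, hx, hx']

-- the two sides agree on an arbitrary multiplicity list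
lemma char_iff (l : List Int) :
    (l.all (fun c => c == 2 || c == 3 || c == 4)
       && ((0 : Int) + (l.countP (fun c => c == 3 || c == 4) : Int) == 4)
       && ((0 : Int) + (l.countP (fun c => c == 2 || c == 4) : Int) == 1))
    = (PySem.List.sorted l (fun x => x) false == [2, 3, 3, 3, 3]
       || PySem.List.sorted l (fun x => x) false == [3, 3, 3, 4]) := by
  rw [Bool.eq_iff_iff]
  simp only [Bool.and_eq_true, List.all_eq_true, beq_iff_eq, Bool.or_eq_true]
  constructor
  · rintro ⟨⟨hall, h34⟩, h24⟩
    rw [countP_or_eq_count_add_count l 3 4 (by decide)] at h34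
    rw [countP_or_eq_count_add_count l 2 4 (by decide)] at h24
    have h34' : l.count 3 + l.count 4 = 4 := by omega
    have h24' : l.count 2 + l.count 4 = 1 := by omega
    have hall' : ∀ x ∈ l, x = 2 ∨ x = 3 ∨ x = 4 := by
      intro x hx; rcases hall x hx with (h | h) | h <;> simp_all
    have hcnt : ∀ x : Int, x ≠ 2 → x ≠ 3 → x ≠ 4 → l.count x = 0 := by
      intro x hx2 hx3 hx4
      rw [List.count_eq_zero]
      intro hmem
      rcases hall' x hmem with h | h | h <;> simp_all
    by_cases h4 : l.count 4 = 0
    · left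
      refine PySem.List.sorted_id_eq_of_perm_of_pairwise l [2,3,3,3,3] ?_ (by decide)
      rw [List.perm_iff_count]
      intro x
      by_cases hx2 : x = 2
      · subst hx2; simp; omega
      · by_cases hx3 : x = 3
        · subst hx3; simp; omega
        · by_cases hx4 : x = 4
          · subst hx4; simp; omega
          · rw [hcnt x hx2 hx3 hx4]
            simp [List.count_cons]; omega
    · right
      refine PySem.List.sorted_id_eq_of_perm_of_pairwise l [3,3,3,4] ?_ (by decide)
      rw [List.perm_iff_count]
      intro x
      by_cases hx2 : x = 2
      · subst hx2; simp; omega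
      · by_cases hx3 : x = 3
        · subst hx3; simp; omega
        · by_cases hx4 : x = 4
          · subst hx4; simp; omega
          · rw [hcnt x hx2 hx3 hx4]
            simp [List.count_cons]; omega
  · rintro (h | h) <;>
    · have hperm := (PySem.List.sorted_perm l (fun x => x) false).symm
      rw [h] at hperm
      refine ⟨⟨?_, ?_⟩, ?_⟩
      · intro x hx
        have := hperm.mem_iff.mp hx
        simp at this
        omega
      · rw [hperm.countP_eq]; decide
      · rw [hperm.countP_eq]; decide

-- ===== VERDICT (by name: the statement is the Claim_ definition above) =====
theorem all_pong_spec : Claim_equal_all_pong := by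
  intro hand _
  show all_pong hand = all_pong_alt hand
  have h := char_iff ((PySem.Dict.counter hand).items.map (fun x => x.2))
  simp only [List.all_map, List.countP_map, Function.comp_def] at h
  simp only [all_pong, all_pong_alt, PySem.Dict.values, allPongLoop_eq]
  exact h
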